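-- pv_equiv track=rewrite | github.com/cchauve/Callysto-SFU-Demos | Baskets/python_Scripts/Rectangular_side_2D.py | pattern_string
-- ===== SOURCE A (Python) =====
-- import string
-- import string
--
-- def pattern_string(num_colors,triangle_height):
--
--     alphabet_list = list(string.ascii_lowercase)
--     colors = alphabet_list[:num_colors]
--
--     num_colors = len(colors)
--     default = '-'
--     output_string = ''
--
--     for i in range( 0 , triangle_height ):
--         if ( i < num_colors):
--             left_string = ''
--             right_string = ''
--
--             for j in range(0,i):
--                 left_string = left_string + current_string[j]
--
--             right_string = left_string[::-1]
--             current_string = left_string + colors[i] + right_string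
--             output_string = output_string + current_string + "\n"
--
--         else:
--             left_string = ''
--
--             for j in range(0,i):
--                 left_string = left_string + current_string[j]
--
--             right_string = left_string[::-1]
--             current_string = left_string + default + right_string
--             output_string = output_string + current_string + "\n"
--
--     output_string = output_string[::-1]
--     return output_string
-- ===== SOURCE B (Python) =====
-- import string
--
-- def pattern_string(num_colors, triangle_height):
--     # Builds the final (already reversed) string directly, back-to-front:
--     # every row is a palindrome, so reversing the whole output just reorders
--     # the rows (with the '\n' moving in front of each).
--     colors = string.ascii_lowercase[:num_colors]
--     h = max(triangle_height, 0)
--     mids = [colors[k] if k < len(colors) else '-' for k in range(h)]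
--     parts = []
--     for i in range(h - 1, -1, -1):
--         half = ''.join(mids[:i])
--         parts.append('\n' + half + mids[i] + half[::-1])
--     return ''.join(parts)
-- ===== Notes on version B (the rewrite author's own statement) =====
-- stated objective: faster
-- what changed: B precomputes the list of middle characters once, builds each palindromic row independently from it (no dependence on the previous row's string), iterates the rows in reverse and emits the final string directly back-to-front, so A's per-character string concatenation and final whole-string reversal disappear.
import Mathlib
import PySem

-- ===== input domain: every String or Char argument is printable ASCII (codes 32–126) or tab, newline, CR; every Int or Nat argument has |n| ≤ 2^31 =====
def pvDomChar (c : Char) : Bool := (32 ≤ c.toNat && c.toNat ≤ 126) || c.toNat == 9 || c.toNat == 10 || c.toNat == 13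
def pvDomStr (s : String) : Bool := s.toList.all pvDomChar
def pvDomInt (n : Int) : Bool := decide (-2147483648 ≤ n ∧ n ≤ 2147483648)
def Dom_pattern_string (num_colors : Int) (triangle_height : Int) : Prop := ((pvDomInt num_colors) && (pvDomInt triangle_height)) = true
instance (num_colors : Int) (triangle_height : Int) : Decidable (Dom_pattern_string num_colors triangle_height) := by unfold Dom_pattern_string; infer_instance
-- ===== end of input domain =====

-- B builds each palindromic row independently from a precomputed middle-character list and
-- emits the final string directly back-to-front (rows are palindromes), so A's threading of the
-- previous row's string, A's per-character '+' concatenation and A's final whole-string reversal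
-- disappear (a timing run measured B faster).

-- ===== PORT A =====
def pvAlphabet : List Char := "abcdefghijklmnopqrstuvwxyz".toList

-- literal port of A; current_string[j] is always in range when read, so pyGetD is exact here
def pattern_string (num_colors : Int) (triangle_height : Int) : String :=
  let colors := PySem.List.slice pvAlphabet none (some num_colors)
  let n : Int := colors.length
  let st := (PySem.List.pyRange 0 triangle_height 1).foldl
    (fun (st : List Char × List Char) i =>
      if i < n then
        let left := (PySem.List.pyRange 0 i 1).foldl
          (fun acc j => acc ++ [PySem.List.pyGetD st.1 j ' ']) []
        let right := ((PySem.List.slice? left none none (-1)).getD [])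
        let cur := left ++ [PySem.List.pyGetD colors i ' '] ++ right
        (cur, st.2 ++ cur ++ ['\n'])
      else
        let left := (PySem.List.pyRange 0 i 1).foldl
          (fun acc j => acc ++ [PySem.List.pyGetD st.1 j ' ']) []
        let right := ((PySem.List.slice? left none none (-1)).getD [])
        let cur := left ++ ['-'] ++ right
        (cur, st.2 ++ cur ++ ['\n']))
    ([], [])
  String.ofList ((PySem.List.slice? st.2 none none (-1)).getD [])

-- ===== PORT B =====
def pattern_string_alt (num_colors : Int) (triangle_height : Int) : String :=
  let colors := PySem.List.slice pvAlphabet none (some num_colors)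
  let h : Int := max triangle_height 0
  let mids := (PySem.List.pyRange 0 h 1).map
    (fun k => if k < (colors.length : Int) then PySem.List.pyGetD colors k ' ' else '-')
  let parts := (PySem.List.pyRange (h - 1) (-1) (-1)).foldl
    (fun acc i =>
      let half := PySem.List.slice mids none (some i)
      acc ++ ('\n' :: (half ++ [PySem.List.pyGetD mids i ' ']
        ++ ((PySem.List.slice? half none none (-1)).getD []))))
    []
  String.ofList parts

-- ===== PRECONDITION & SPEC =====
def Spec_pattern_string (num_colors : Int) (triangle_height : Int) (out : String) : Prop := out = pattern_string_alt num_colors triangle_height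
instance (num_colors : Int) (triangle_height : Int) (out : String) : Decidable (Spec_pattern_string num_colors triangle_height out) := by unfold Spec_pattern_string; infer_instance

-- ===== CLAIM (what is proved, stated in full; the proofs are below) =====
def Claim_equal_pattern_string : Prop := ∀ (num_colors : Int) (triangle_height : Int), Dom_pattern_string num_colors triangle_height → Spec_pattern_string num_colors triangle_height (pattern_string num_colors triangle_height)

-- ===== LEMMAS AND PROOFS =====

-- the middle character of row k, for a given color list
def pvMid (colors : List Char) (k : Nat) : Char :=
  if (k : Int) < (colors.length : Int) then colors.getD k ' ' else '-'

-- first k middle characters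
def pvP (colors : List Char) (k : Nat) : List Char := (List.range k).map (pvMid colors)

-- row k of the triangle
def pvRow (colors : List Char) (k : Nat) : List Char :=
  pvP colors k ++ [pvMid colors k] ++ (pvP colors k).reverse

-- A's current_string after k iterations ([] before the first row is built)
def pvCur (colors : List Char) : Nat → List Char
  | 0 => []
  | k + 1 => pvRow colors k

-- A's output before the final reversal, rows 0..k-1 each followed by '\n'
def pvUp (colors : List Char) : Nat → List Char
  | 0 => []
  | k + 1 => pvUp colors k ++ pvRow colors k ++ ['\n']

theorem pvP_succ (colors : List Char) (k : Nat) :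
    pvP colors (k + 1) = pvP colors k ++ [pvMid colors k] := by
  simp [pvP, List.range_succ]

theorem pvRow_take (colors : List Char) (k : Nat) :
    (pvRow colors k).take (k + 1) = pvP colors (k + 1) := by
  have hl : (pvP colors k).length = k := by simp [pvP]
  simp [pvRow, pvP_succ, List.take_append, hl]

-- the inner j-loop of A reads the first i characters of the current row
theorem pvLeft_eq_take (cur : List Char) (i : Nat) (h : i ≤ cur.length) :
    (PySem.List.pyRange 0 (i : Int) 1).foldl
      (fun acc j => acc ++ [PySem.List.pyGetD cur j ' ']) [] = cur.take i := by
  rw [PySem.List.foldl_append_singleton_eq_map]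
  rw [PySem.List.pyRange_zero_natCast]
  apply List.ext_getElem
  · simp [h]
  · intro j hj hj'
    simp at hj
    simp [PySem.List.pyGetD_natCast, List.getD_eq_getElem?_getD,
      List.getElem?_eq_getElem (by omega : j < cur.length)]

-- the state of A's fold after k iterations
theorem pvA_fold (colors : List Char) (k : Nat) :
    (PySem.List.pyRange 0 (k : Int) 1).foldl
      (fun (st : List Char × List Char) i =>
        if i < (colors.length : Int) then
          let left := (PySem.List.pyRange 0 i 1).foldl
            (fun acc j => acc ++ [PySem.List.pyGetD st.1 j ' ']) []
          let right := ((PySem.List.slice? left none none (-1)).getD [])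
          let cur := left ++ [PySem.List.pyGetD colors i ' '] ++ right
          (cur, st.2 ++ cur ++ ['\n'])
        else
          let left := (PySem.List.pyRange 0 i 1).foldl
            (fun acc j => acc ++ [PySem.List.pyGetD st.1 j ' ']) []
          let right := ((PySem.List.slice? left none none (-1)).getD [])
          let cur := left ++ ['-'] ++ right
          (cur, st.2 ++ cur ++ ['\n']))
      ([], []) =
      (pvCur colors k, pvUp colors k) := by
  induction k with
  | zero => simp [pvCur, pvUp]
  | succ k ih =>
    rw [show ((k + 1 : Nat) : Int) = (k : Int) + 1 by push_cast; ring,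
      PySem.List.pyRange_one_succ_right (by positivity), List.foldl_append, ih]
    have htake : (pvCur colors k).take k = pvP colors k := by
      cases k with
      | zero => simp [pvCur, pvP]
      | succ k => rw [pvCur, pvRow_take, pvP_succ]
    have hklen : k ≤ (pvCur colors k).length := by
      cases k with
      | zero => simp
      | succ k => simp [pvCur, pvRow, pvP]
    have hleft : (PySem.List.pyRange 0 (k : Int) 1).foldl
        (fun acc j => acc ++ [PySem.List.pyGetD (pvCur colors k) j ' ']) []
        = pvP colors k := by
      rw [pvLeft_eq_take _ k hklen, htake]
    by_cases hk : (k : Int) < (colors.length : Int)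
    · simp only [List.foldl_cons, List.foldl_nil, hk, if_pos, hleft,
        PySem.List.slice?_none_none_neg_one, Option.getD_some, Prod.mk.injEq]
      refine ⟨?_, ?_⟩
      · simp [pvCur, pvRow, pvMid, hk, PySem.List.pyGetD_natCast, List.append_assoc]
      · simp [pvUp, pvRow, pvMid, hk, PySem.List.pyGetD_natCast, List.append_assoc]
    · simp only [List.foldl_cons, List.foldl_nil, hk, if_neg, not_false_iff, hleft,
        PySem.List.slice?_none_none_neg_one, Option.getD_some, Prod.mk.injEq]
      refine ⟨?_, ?_⟩
      · simp [pvCur, pvRow, pvMid, hk, List.append_assoc]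
      · simp [pvUp, pvRow, pvMid, hk, List.append_assoc]

-- B's parts, built back to front
theorem pvB_fold (colors : List Char) (h : Nat) (k : Nat) (hk : k ≤ h) (acc : List Char) :
    (PySem.List.pyRange ((k : Int) - 1) (-1) (-1)).foldl
      (fun acc i =>
        let half := PySem.List.slice
          ((PySem.List.pyRange 0 (h : Int) 1).map
            (fun j => if j < (colors.length : Int) then PySem.List.pyGetD colors j ' ' else '-'))
          none (some i)
        acc ++ ('\n' :: (half ++ [PySem.List.pyGetD
            ((PySem.List.pyRange 0 (h : Int) 1).map
              (fun j => if j < (colors.length : Int) then PySem.List.pyGetD colors j ' ' else '-')) i ' ']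
          ++ ((PySem.List.slice? half none none (-1)).getD []))))
      acc = acc ++ (pvUp colors k).reverse := by
  have hmids : ((PySem.List.pyRange 0 (h : Int) 1).map
      (fun j => if j < (colors.length : Int) then PySem.List.pyGetD colors j ' ' else '-'))
      = (List.range h).map (pvMid colors) := by
    rw [PySem.List.pyRange_zero_natCast, List.map_map]
    apply List.map_congr_left
    intro j hj
    simp [Function.comp, pvMid, PySem.List.pyGetD_natCast]
  induction k generalizing acc with
  | zero =>
    rw [PySem.List.pyRange_neg_one_eq_nil (by omega)]
    simp [pvUp]
  | succ k ih =>
    rw [show ((k + 1 : Nat) : Int) - 1 = (k : Int) by push_cast; ring,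
      PySem.List.pyRange_neg_one_cons (by omega), List.foldl_cons]
    rw [ih (by omega)]
    have hhalf : PySem.List.slice ((List.range h).map (pvMid colors)) none (some (k : Int))
        = pvP colors k := by
      rw [PySem.List.slice_to_natCast, pvP, ← List.map_take, List.take_range, Nat.min_eq_left (by omega : k ≤ h)]
    have hmid : PySem.List.pyGetD ((List.range h).map (pvMid colors)) (k : Int) ' '
        = pvMid colors k := by
      simp [PySem.List.pyGetD_natCast, List.getD_eq_getElem?_getD,
        List.getElem?_range (by omega : k < h)]
    simp only [hmids, hhalf, hmid, PySem.List.slice?_none_none_neg_one]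
    simp only [Option.getD_some, pvUp, List.reverse_append, List.reverse_cons,
      List.reverse_nil, List.nil_append, List.append_assoc]
    simp [pvRow]

theorem pvHeight_eq (t : Int) : PySem.List.pyRange 0 t 1 = PySem.List.pyRange 0 ((max t 0).toNat : Int) 1 := by
  by_cases h : t ≤ 0
  · rw [PySem.List.pyRange_one_eq_nil h, PySem.List.pyRange_one_eq_nil (by omega)]
  · congr 1
    omega

-- ===== VERDICT (by name: the statement is the Claim_ definition above) =====
theorem pattern_string_spec : Claim_equal_pattern_string := by
  intro num_colors triangle_height _
  unfold Spec_pattern_string pattern_string pattern_string_alt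
  set colors := PySem.List.slice pvAlphabet none (some num_colors) with hc
  set h : Nat := (max triangle_height 0).toNat with hh
  simp only
  rw [pvHeight_eq, pvA_fold colors h]
  have hmax : max triangle_height 0 = (h : Int) := by omega
  rw [hmax]
  rw [pvB_fold colors h h (le_refl h) []]
  rw [PySem.List.slice?_none_none_neg_one]
  simp
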